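-- pv_equiv track=rewrite | github.com/earthwuyang/code_written_by_openhands | learned_index_benefit/utils/sql_converter.py | to_mysql
-- ===== SOURCE A (Python) =====
-- def to_mysql(sql: str) -> str:
--     """Convert SQL with double quotes to MySQL format with backticks"""
--     # Remove any existing backticks first
--     sql = sql.replace('`', '')
--
--     # Handle table.column patterns
--     parts = []
--     current = 0
--     in_quotes = False
--     quote_start = -1
--
--     for i, char in enumerate(sql):
--         if char == '"':
--             if not in_quotes:
--                 in_quotes = True
--                 quote_start = i
--             else:
--                 in_quotes = False
--                 quoted_part = sql[quote_start+1:i]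
--                 # Check if it's a table.column pattern
--                 if '.' in quoted_part:
--                     table, column = quoted_part.split('.')
--                     parts.append(sql[current:quote_start] + f'`{table}`.`{column}`')
--                 else:
--                     parts.append(sql[current:quote_start] + f'`{quoted_part}`')
--                 current = i + 1
--
--     if current < len(sql):
--         parts.append(sql[current:])
--
--     converted_sql = ''.join(parts)
--
--     # Clean up any remaining quotes and normalize whitespace
--     converted_sql = ' '.join(converted_sql.split())
--
--     return converted_sql
-- ===== SOURCE B (Python) =====
-- def _quote(q):
--     if '.' in q:
--         table, column = q.split('.')
--         return f'`{table}`.`{column}`'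
--     return f'`{q}`'
--
--
-- def _emit(rest):
--     out = []
--     while len(rest) >= 2:
--         out.append(_quote(rest[0]))
--         out.append(rest[1])
--         rest = rest[2:]
--     if rest:
--         out.append('"' + rest[0])  # unmatched opening quote: keep it verbatim
--     return ''.join(out)
--
--
-- def to_mysql(sql: str) -> str:
--     pieces = sql.replace('`', '').split('"')
--     converted = pieces[0] + _emit(pieces[1:])
--     return ' '.join(converted.split())
-- ===== Notes on version B (the rewrite author's own statement) =====
-- stated objective: simpler
-- what changed: Replaces A's per-character in_quotes state machine with its current/quote_start index bookkeeping and slicing by one split on the double-quote character followed by a pairwise walk over the pieces; the two-variable unpacking of the dot-split is kept, so both raise ValueError on a quoted identifier containing two or more dots, which Pre_ excludes.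
import Mathlib
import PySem

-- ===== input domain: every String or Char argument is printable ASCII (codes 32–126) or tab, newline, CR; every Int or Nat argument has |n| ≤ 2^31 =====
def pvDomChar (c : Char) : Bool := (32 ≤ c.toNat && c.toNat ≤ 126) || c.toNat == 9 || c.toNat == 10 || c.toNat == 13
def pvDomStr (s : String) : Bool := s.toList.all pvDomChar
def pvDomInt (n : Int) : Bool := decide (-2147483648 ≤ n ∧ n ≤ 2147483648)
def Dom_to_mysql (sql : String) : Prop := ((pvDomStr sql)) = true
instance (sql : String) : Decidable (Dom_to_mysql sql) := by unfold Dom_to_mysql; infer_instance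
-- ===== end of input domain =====

-- B replaces A's per-character quote state machine by one split on the double-quote
-- character followed by a pairwise walk over the pieces (objective:
-- simpler); return values agree on all of Pre_.

-- ===== PORT A =====
-- A's loop body: state (parts, current, in_quotes, quote_start), one enumerated char at a time.
def pvStepA (cs : List Char) (st : List (List Char) × Int × Bool × Int) (ic : Int × Char) :
    List (List Char) × Int × Bool × Int :=
  match st, ic with
  | (parts, current, in_quotes, quote_start), (i, ch) =>
    if ch = '"' then
      if in_quotes = false then (parts, current, true, i)
      else
        let quoted := PySem.List.slice cs (some (quote_start + 1)) (some i)
        let trans :=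
          if PySem.Chars.isIn ['.'] quoted then
            -- 'table, column = quoted_part.split(".")'; with ≥ 2 dots Python raises ValueError
            -- (excluded by Pre_), the port returns [] there
            match PySem.Chars.splitOn quoted ['.'] with
            | [t, c] => '`' :: (t ++ ('`' :: '.' :: '`' :: (c ++ ['`'])))
            | _ => []
          else '`' :: (quoted ++ ['`'])
        (parts ++ [PySem.List.slice cs (some current) (some quote_start) ++ trans],
         i + 1, false, quote_start)
    else (parts, current, in_quotes, quote_start)

-- 'if current < len(sql): parts.append(sql[current:])' then ''.join(parts)
def pvFinalA (cs : List Char) (r : List (List Char) × Int × Bool × Int) : List Char :=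
  (if r.2.1 < (cs.length : Int) then r.1 ++ [PySem.List.slice cs (some r.2.1) none] else r.1).flatten

def to_mysql (sql : String) : String :=
  let cs : List Char := (PySem.Str.replace sql "`" "").toList   -- sql = sql.replace('`','')
  let r := (PySem.List.enumerate cs).foldl (pvStepA cs) ([], 0, false, -1)
  let converted := pvFinalA cs r
  String.mk (PySem.Chars.join [' '] (PySem.Chars.split₀ converted))   -- ' '.join(converted.split())

-- ===== PORT B =====
def pvQuoteB (q : List Char) : List Char :=
  if PySem.Chars.isIn ['.'] q then
    -- 'table, column = q.split(".")'; with ≥ 2 dots Python raises ValueError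
    -- (excluded by Pre_), the port returns [] there
    match PySem.Chars.splitOn q ['.'] with
    | [t, c] => '`' :: (t ++ ('`' :: '.' :: '`' :: (c ++ ['`'])))
    | _ => []
  else '`' :: (q ++ ['`'])

-- Source B's while-loop over 'rest' two pieces at a time; a lone leftover piece is the text
-- after an unmatched opening quote, kept verbatim
def pvEmit : List (List Char) → List Char
  | q :: t :: rest => pvQuoteB q ++ (t ++ pvEmit rest)
  | [r] => '"' :: r
  | [] => []

def to_mysql_alt (sql : String) : String :=
  let pieces := PySem.Chars.splitOn ((PySem.Str.replace sql "`" "").toList) ['"']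
  let converted := pieces.headI ++ pvEmit pieces.tail   -- split never returns []: pieces[0] is headI
  String.mk (PySem.Chars.join [' '] (PySem.Chars.split₀ converted))

-- ===== PRECONDITION & SPEC =====
-- Pre_ excludes inputs where a completed double-quoted segment (an odd-position piece of
-- the split on the double-quote character that is not a trailing unmatched piece) contains
-- two or more dots: there the two-variable unpacking of the dot-split raises ValueError in
-- A (and in B alike).
def Pre_to_mysql (sql : String) : Prop :=
  ∀ i ∈ List.range (PySem.Chars.splitOn ((PySem.Str.replace sql "`" "").toList) ['"']).length,
    i % 2 = 1 → i + 1 < (PySem.Chars.splitOn ((PySem.Str.replace sql "`" "").toList) ['"']).length →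
    PySem.Chars.count ((PySem.Chars.splitOn ((PySem.Str.replace sql "`" "").toList) ['"']).getD i []) ['.'] ≤ 1
instance (sql : String) : Decidable (Pre_to_mysql sql) := by unfold Pre_to_mysql; infer_instance

def pvWitness_to_mysql : String := "SELECT \"t.c\" FROM \"tab\" WHERE \"t.x\" = 1"

def Spec_to_mysql (sql : String) (out : String) : Prop := out = to_mysql_alt sql
instance (sql : String) (out : String) : Decidable (Spec_to_mysql sql out) := by unfold Spec_to_mysql; infer_instance

-- ===== CLAIM (what is proved, stated in full; the proofs are below) =====
def Claim_equal_to_mysql : Prop := ∀ (sql : String), Dom_to_mysql sql → Pre_to_mysql sql → Spec_to_mysql sql (to_mysql sql)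

-- ===== LEMMAS AND PROOFS =====

-- slice helper lemmas
lemma pv_slice_nn (cs : List Char) (cn k : Nat) :
    PySem.List.slice cs (some (cn : Int)) (some (k : Int)) = (cs.drop cn).take (k - cn) :=
  PySem.List.slice_natCast cs cn k

lemma pv_slice_snoc (cs : List Char) (cn k : Nat) (c : Char) (hck : cn ≤ k) (hc : cs[k]? = some c) :
    PySem.List.slice cs (some (cn : Int)) (some ((k + 1 : Nat) : Int))
      = PySem.List.slice cs (some (cn : Int)) (some (k : Int)) ++ [c] := by
  rw [pv_slice_nn, pv_slice_nn]
  have h1 : k + 1 - cn = (k - cn) + 1 := by omega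
  rw [h1, List.take_succ]
  have h2 : (cs.drop cn)[k - cn]? = some c := by
    rw [List.getElem?_drop]
    have : cn + (k - cn) = k := by omega
    rw [this]; exact hc
  simp [h2]

lemma pv_slice_self (cs : List Char) (k : Nat) :
    PySem.List.slice cs (some (k : Int)) (some (k : Int)) = [] := by
  simp [pv_slice_nn]

lemma pv_slice_full (cs : List Char) (cn : Nat) :
    PySem.List.slice cs (some (cn : Int)) (some (cs.length : Int)) = cs.drop cn := by
  rw [pv_slice_nn]
  exact List.take_of_length_le (by simp)

lemma pv_drop_split (cs : List Char) (cn qn : Nat) (hcq : cn ≤ qn) (hq : cs[qn]? = some '"') :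
    cs.drop cn = (cs.drop cn).take (qn - cn) ++ '"' :: cs.drop (qn + 1) := by
  have hqlt : qn < cs.length := List.getElem?_eq_some_iff.mp hq |>.1
  conv_lhs => rw [← List.take_append_drop (qn - cn) (cs.drop cn)]
  congr 1
  rw [List.drop_drop]
  have h3 : cn + (qn - cn) = qn := by omega
  rw [h3, List.drop_eq_getElem_cons hqlt]
  congr 1
  have := List.getElem?_eq_some_iff.mp hq |>.2
  simp [this]
def pvConsHead (x : List Char) : List (List Char) → List (List Char)
  | [] => [x]
  | p :: ps => (x ++ p) :: ps
def pvSplit1 : List Char → List (List Char)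
  | [] => [[]]
  | c :: t => if c = '"' then [] :: pvSplit1 t else pvConsHead [c] (pvSplit1 t)
lemma pvSplit1_ne_nil (l : List Char) : pvSplit1 l ≠ [] := by
  cases l with
  | nil => simp [pvSplit1]
  | cons c t =>
    simp only [pvSplit1]
    split
    · simp
    · cases h : pvSplit1 t <;> simp [pvConsHead]

lemma pvConsHead_nil (ps : List (List Char)) (h : ps ≠ []) : pvConsHead [] ps = ps := by
  cases ps with
  | nil => exact absurd rfl h
  | cons p ps => simp [pvConsHead]

lemma pvGo_spec : ∀ (fuel : Nat) (l cur : List Char) (acc : List (List Char)), l.length < fuel →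
    PySem.Chars.splitOn.go ['"'] fuel l cur acc = acc.reverse ++ pvConsHead cur.reverse (pvSplit1 l) := by
  intro fuel
  induction fuel with
  | zero => intro l cur acc h; omega
  | succ f ih =>
    intro l cur acc h
    cases l with
    | nil => simp [PySem.Chars.splitOn.go, pvSplit1, pvConsHead]
    | cons c rest =>
      rw [PySem.Chars.splitOn.go]
      by_cases hc : c = '"'
      · subst hc
        simp only [List.isPrefixOf, BEq.rfl, Bool.true_and, if_pos]
        rw [ih _ _ _ (by simp at h ⊢; omega)]
        cases hr : pvSplit1 rest with
        | nil => exact absurd hr (pvSplit1_ne_nil rest)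
        | cons p ps => simp [pvSplit1, pvConsHead, hr]
      · have : (['"'].isPrefixOf (c :: rest)) = false := by
          simp [List.isPrefixOf]
          exact fun hcc => absurd hcc.symm hc
        rw [if_neg (by simp [this])]
        rw [ih _ _ _ (by simp at h ⊢; omega)]
        cases hr : pvSplit1 rest with
        | nil => exact absurd hr (pvSplit1_ne_nil rest)
        | cons p ps => simp [pvSplit1, hc, pvConsHead, hr]

lemma pvSplitOn_eq (cs : List Char) : PySem.Chars.splitOn cs ['"'] = pvSplit1 cs := by
  rw [PySem.Chars.splitOn, pvGo_spec _ _ _ _ (by omega)]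
  cases hr : pvSplit1 cs with
  | nil => exact absurd hr (pvSplit1_ne_nil cs)
  | cons p ps => simp [pvConsHead]

lemma pvFold_spec (cs : List Char) : ∀ (ds : List Char) (k : Nat), cs.drop k = ds → k + ds.length = cs.length →
    (∀ (P : List (List Char)) (cn : Nat) (qs : Int), cn ≤ k →
      pvFinalA cs (List.foldl (pvStepA cs) (P, (cn : Int), false, qs) (PySem.List.enumerate ds (k : Int)))
        = P.flatten ++ PySem.List.slice cs (some (cn : Int)) (some (k : Int))
            ++ ((pvSplit1 ds).headI ++ pvEmit (pvSplit1 ds).tail))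
    ∧
    (∀ (P : List (List Char)) (cn qn : Nat), cn ≤ qn → qn < k → cs[qn]? = some '"' →
      pvFinalA cs (List.foldl (pvStepA cs) (P, (cn : Int), true, (qn : Int)) (PySem.List.enumerate ds (k : Int)))
        = P.flatten ++ PySem.List.slice cs (some (cn : Int)) (some (qn : Int))
            ++ pvEmit (pvConsHead (PySem.List.slice cs (some ((qn : Int) + 1)) (some (k : Int))) (pvSplit1 ds))) := by
  intro ds
  induction ds with
  | nil =>
    intro k hdrop hlen
    have hk : k = cs.length := by simpa using hlen
    subst hk
    constructor
    · intro P cn qs hcn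
      simp only [PySem.List.enumerate, List.foldl_nil, pvFinalA, pvSplit1, pvEmit,
        List.headI, List.tail, List.append_nil]
      by_cases hlt : cn < cs.length
      · rw [if_pos (by exact_mod_cast hlt)]
        simp [pv_slice_full, PySem.List.slice_from_natCast]
      · have hce : cn = cs.length := by omega
        subst hce
        rw [if_neg (by omega)]
        simp [pv_slice_self]
    · intro P cn qn hcq hqk hq
      simp only [PySem.List.enumerate, List.foldl_nil, pvFinalA]
      have hlt : cn < cs.length := by omega
      rw [if_pos (by exact_mod_cast hlt)]
      simp only [pvSplit1, pvConsHead, pvEmit, List.append_nil]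
      rw [show ((qn : Int) + 1) = ((qn + 1 : Nat) : Int) by push_cast; ring,
          pv_slice_full, pv_slice_nn, PySem.List.slice_from_natCast,
          pv_drop_split cs cn qn hcq hq]
      simp only [List.flatten_append, List.flatten_cons, List.flatten_nil, List.append_nil,
        List.append_assoc]
      congr 1
      rw [List.take_append]
      simp [List.take_take]
      omega
  | cons c t ih =>
    intro k hdrop hlen
    have hck : cs[k]? = some c := by
      have : (cs.drop k)[0]? = some c := by rw [hdrop]; rfl
      rwa [List.getElem?_drop, Nat.add_zero] at this
    have hdrop' : cs.drop (k + 1) = t := by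
      have : (cs.drop k).tail = t := by rw [hdrop]; rfl
      rwa [List.tail_drop] at this
    have hlen' : (k + 1) + t.length = cs.length := by simp at hlen; omega
    have ihs := ih (k + 1) hdrop' hlen'
    have hcast : (k : Int) + 1 = ((k + 1 : Nat) : Int) := by push_cast; ring
    constructor
    · intro P cn qs hcn
      rw [show PySem.List.enumerate (c :: t) (k : Int) = ((k : Int), c) :: PySem.List.enumerate t ((k : Int) + 1) from rfl]
      rw [List.foldl_cons]
      by_cases hc : c = '"'
      · subst hc
        rw [show pvStepA cs (P, (cn : Int), false, qs) ((k : Int), '"') = (P, (cn : Int), true, (k : Int)) from rfl]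
        rw [hcast]
        rw [ihs.2 P cn k hcn (by omega) hck, hcast, pv_slice_self]
        rw [pvConsHead_nil _ (pvSplit1_ne_nil t)]
        simp [pvSplit1]
      · rw [show pvStepA cs (P, (cn : Int), false, qs) ((k : Int), c) = (P, (cn : Int), false, qs) by simp [pvStepA, hc]]
        rw [hcast, ihs.1 P cn qs (by omega)]
        rw [pv_slice_snoc cs cn k c hcn hck]
        cases hr : pvSplit1 t with
        | nil => exact absurd hr (pvSplit1_ne_nil t)
        | cons p ps => simp [pvSplit1, hc, hr, pvConsHead]
    · intro P cn qn hcq hqk hq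
      rw [show PySem.List.enumerate (c :: t) (k : Int) = ((k : Int), c) :: PySem.List.enumerate t ((k : Int) + 1) from rfl]
      rw [List.foldl_cons]
      by_cases hc : c = '"'
      · subst hc
        rw [show pvStepA cs (P, (cn : Int), true, (qn : Int)) ((k : Int), '"')
            = (P ++ [PySem.List.slice cs (some (cn : Int)) (some (qn : Int))
                ++ pvQuoteB (PySem.List.slice cs (some ((qn : Int) + 1)) (some (k : Int)))],
               (k : Int) + 1, false, (qn : Int)) from rfl]
        rw [hcast]
        rw [ihs.1 _ (k + 1) (qn : Int) (by omega)]
        rw [pv_slice_self]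
        cases hr : pvSplit1 t with
        | nil => exact absurd hr (pvSplit1_ne_nil t)
        | cons p ps => simp [pvSplit1, hr, pvConsHead, pvEmit]
      · rw [show pvStepA cs (P, (cn : Int), true, (qn : Int)) ((k : Int), c) = (P, (cn : Int), true, (qn : Int)) by simp [pvStepA, hc]]
        rw [hcast, ihs.2 P cn qn hcq (by omega) hq]
        rw [show ((qn : Int) + 1) = ((qn + 1 : Nat) : Int) by push_cast; ring]
        rw [pv_slice_snoc cs (qn + 1) k c (by omega) hck]
        cases hr : pvSplit1 t with
        | nil => exact absurd hr (pvSplit1_ne_nil t)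
        | cons p ps => simp [pvSplit1, hc, hr, pvConsHead]

-- ===== VERDICT (by name: the statement is the Claim_ definition above) =====
theorem to_mysql_spec : Claim_equal_to_mysql := by
  intro sql _ _
  unfold Spec_to_mysql to_mysql to_mysql_alt
  have h := (pvFold_spec ((PySem.Str.replace sql "`" "").toList)
      ((PySem.Str.replace sql "`" "").toList) 0 (by simp) (by simp)).1 [] 0 (-1) (by omega)
  simp only [Nat.cast_zero] at h
  refine congrArg (fun l => String.mk (PySem.Chars.join [' '] (PySem.Chars.split₀ l))) ?_
  rw [pvSplitOn_eq, h]
  simp [PySem.List.slice]
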